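-- pv_equiv track=rewrite | github.com/parkjisu6239/2021_APS | NonSWEA/p_GNS/s1.py | Weird_numbers_sort
-- ===== SOURCE A (Python) =====
-- def Weird_numbers_sort(N, Weird_numbers):
--     # 카운팅 소트
--     # 이상한 0~9 리스트 생성
--     num_list = ["ZRO", "ONE", "TWO", "THR", "FOR", "FIV", "SIX", "SVN", "EGT", "NIN"]
--     # 이상한 숫자들의 등장 횟수를 세기 위한 변수 생성
--     counter = [0] * 10
--     # 이상한 숫자 리스트 길이 만큼(주어진 입력값 N)
--     for i in range(N):
--         # 이상한 리스트가 각 인덱스와 맞게 생성되어 있어서 인덱스 접근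
--         for j in range(10):
--             # 이상한 숫자와 같은 경우 그때 인덱스의 값을 +1 해주고,
--             # 반복을 줄이기 위해 break로 나가게 해줌
--             if Weird_numbers[i] == num_list[j]:
--                 counter[j] += 1
--                 break
--
--     # 정렬할 리스트 생성
--     sorted_Weird_numbers = []
--     # 0~9만큼
--     for i in range(10):
--         # 0~9에 쌓인 카운트수만큼 반복
--         for _ in range(counter[i]):
--             sorted_Weird_numbers.append(num_list[i])
--
--     return ' '.join(sorted_Weird_numbers)
-- ===== SOURCE B (Python) =====
-- def Weird_numbers_sort(N, Weird_numbers):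
--     num_list = ["ZRO", "ONE", "TWO", "THR", "FOR", "FIV", "SIX", "SVN", "EGT", "NIN"]
--     selected = [w for w in (Weird_numbers[i] for i in range(N)) if w in num_list]
--     selected.sort(key=num_list.index)
--     return ' '.join(selected)
-- ===== Notes on version B (the rewrite author's own statement) =====
-- stated objective: simpler
-- what changed: Replaced the hand-rolled counting sort (nested 10-way comparison loop filling bucket counters, then a bucket-expansion loop) by a filter of the first N entries against the 10-word list followed by a comparison sort with key=num_list.index and a join.
import Mathlib
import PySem

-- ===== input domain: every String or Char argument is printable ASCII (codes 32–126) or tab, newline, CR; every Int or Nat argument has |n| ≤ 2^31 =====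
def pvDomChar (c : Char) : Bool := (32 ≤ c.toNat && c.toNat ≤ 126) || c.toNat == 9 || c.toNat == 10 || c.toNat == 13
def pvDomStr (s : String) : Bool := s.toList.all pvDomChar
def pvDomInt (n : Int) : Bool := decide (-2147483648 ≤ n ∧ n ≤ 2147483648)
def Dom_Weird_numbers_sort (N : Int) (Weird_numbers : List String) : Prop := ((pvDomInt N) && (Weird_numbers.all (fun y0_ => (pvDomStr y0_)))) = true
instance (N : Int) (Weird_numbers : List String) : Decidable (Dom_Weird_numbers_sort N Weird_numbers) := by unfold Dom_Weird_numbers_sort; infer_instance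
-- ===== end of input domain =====

-- B replaces A's hand-rolled counting sort by filter + sort(key=num_list.index) + join: simpler, same result.

-- the fixed ten-word list both programs use
def pvNumList : List String := ["ZRO", "ONE", "TWO", "THR", "FOR", "FIV", "SIX", "SVN", "EGT", "NIN"]

-- ===== PORT A =====
-- inner 'for j in range(10): if w == num_list[j]: counter[j] += 1; break'
def pvInnerA (w : String) (js : List Int) (counter : List Int) : List Int :=
  match js with
  | [] => counter
  | j :: rest =>
    if w == PySem.List.pyGetD pvNumList j "" then
      PySem.List.pySetD counter j (PySem.List.pyGetD counter j 0 + 1)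
    else pvInnerA w rest counter

def Weird_numbers_sort (N : Int) (Weird_numbers : List String) : String :=
  let counter : List Int := List.replicate 10 0
  let counter := (PySem.List.pyRange 0 N 1).foldl
    (fun c i => pvInnerA (PySem.List.pyGetD Weird_numbers i "") (PySem.List.pyRange 0 10 1) c) counter
  let sortedW := (PySem.List.pyRange 0 10 1).foldl
    (fun acc i =>
      (PySem.List.pyRange 0 (PySem.List.pyGetD counter i 0) 1).foldl
        (fun acc2 _ => acc2 ++ [PySem.List.pyGetD pvNumList i ""]) acc) []
  PySem.Str.join " " sortedW

-- ===== PORT B =====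
-- 'key=num_list.index' of Source B (total on the selected words: they are all in the list)
def pvKey (w : String) : Nat := (PySem.List.index? pvNumList w).getD 0

def Weird_numbers_sort_alt (N : Int) (Weird_numbers : List String) : String :=
  let selected := (PySem.List.pyRange 0 N 1).foldl
    (fun acc i =>
      let w := PySem.List.pyGetD Weird_numbers i ""
      if pvNumList.contains w then acc ++ [w] else acc) []
  let sortedSel := PySem.List.sorted selected pvKey false
  PySem.Str.join " " sortedSel

-- ===== PRECONDITION & SPEC =====
-- Pre_ excludes exactly the inputs where A raises IndexError (N exceeds the list length; B raises there too).
def Pre_Weird_numbers_sort (N : Int) (Weird_numbers : List String) : Prop :=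
  N ≤ (Weird_numbers.length : Int)
instance (N : Int) (Weird_numbers : List String) : Decidable (Pre_Weird_numbers_sort N Weird_numbers) := by
  unfold Pre_Weird_numbers_sort; infer_instance

def pvWitness_Weird_numbers_sort : Int × List String := (3, ["THR", "ZRO", "THR"])

def Spec_Weird_numbers_sort (N : Int) (Weird_numbers : List String) (out : String) : Prop := out = Weird_numbers_sort_alt N Weird_numbers
instance (N : Int) (Weird_numbers : List String) (out : String) : Decidable (Spec_Weird_numbers_sort N Weird_numbers out) := by unfold Spec_Weird_numbers_sort; infer_instance

-- ===== CLAIM (what is proved, stated in full; the proofs are below) =====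
def Claim_equal_Weird_numbers_sort : Prop := ∀ (N : Int) (Weird_numbers : List String), Dom_Weird_numbers_sort N Weird_numbers → Pre_Weird_numbers_sort N Weird_numbers → Spec_Weird_numbers_sort N Weird_numbers (Weird_numbers_sort N Weird_numbers)

-- ===== LEMMAS AND PROOFS =====

-- the common canonical result list: counts of each weird word, in word order
def pvCanon (ys : List String) : List String :=
  pvNumList.flatMap (fun v => List.replicate (ys.count v) v)

-- both outer loops read exactly the first N elements of the list
lemma pv_foldl_prefix {B : Type} (W : List String) (N : Int) (hN : N ≤ (W.length : Int))
    (f : B → String → B) (init : B) :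
    (PySem.List.pyRange 0 N 1).foldl (fun acc i => f acc (PySem.List.pyGetD W i "")) init
      = (W.take N.toNat).foldl f init := by
  rcases le_total N 0 with h | h
  · rw [PySem.List.pyRange_one_eq_nil h, Int.toNat_of_nonpos h]
    simp
  · have hlen : ((W.take N.toNat).length : Int) = N := by
      simp [List.length_take]
      omega
    have h2 : (PySem.List.pyRange 0 N 1).foldl (fun acc i => f acc (PySem.List.pyGetD W i "")) init
        = (PySem.List.pyRange 0 ((W.take N.toNat).length : Int) 1).foldl
            (fun acc i => f acc (PySem.List.pyGetD (W.take N.toNat) i "")) init := by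
      rw [hlen]
      apply PySem.List.foldl_congr_mem
      intro acc x hx
      rcases PySem.List.mem_pyRange_one.mp hx with ⟨hx0, hx1⟩
      have hxW : x < (W.length : Int) := by omega
      have hxT : x < ((W.take N.toNat).length : Int) := by omega
      rw [PySem.List.pyGetD_eq_getElem W "" hx0 hxW,
          PySem.List.pyGetD_eq_getElem (W.take N.toNat) "" hx0 hxT]
      congr 1
      simp [List.getElem_take]
    rw [h2]
    exact PySem.List.foldl_pyRange_zero_pyGetD' (W.take N.toNat) "" f init

lemma pv_loopA (W : List String) (N : Int) (hN : N ≤ (W.length : Int)) (init : List Int) :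
    (PySem.List.pyRange 0 N 1).foldl
        (fun c i => pvInnerA (PySem.List.pyGetD W i "") (PySem.List.pyRange 0 10 1) c) init
      = (W.take N.toNat).foldl (fun c w => pvInnerA w (PySem.List.pyRange 0 10 1) c) init :=
  pv_foldl_prefix W N hN (fun c w => pvInnerA w (PySem.List.pyRange 0 10 1) c) init

lemma pv_loopB (W : List String) (N : Int) (hN : N ≤ (W.length : Int)) (init : List String) :
    (PySem.List.pyRange 0 N 1).foldl
        (fun acc i =>
          if pvNumList.contains (PySem.List.pyGetD W i "") then acc ++ [PySem.List.pyGetD W i ""] else acc) init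
      = (W.take N.toNat).foldl (fun acc w => if pvNumList.contains w then acc ++ [w] else acc) init :=
  pv_foldl_prefix W N hN (fun acc w => if pvNumList.contains w then acc ++ [w] else acc) init

-- skipping a non-matching word in A's inner loop
lemma pvInnerA_skip (w v : String) (j : Int) (rest : List Int) (c : List Int)
    (hv : PySem.List.pyGetD pvNumList j "" = v) (hne : ¬ w = v) :
    pvInnerA w (j :: rest) c = pvInnerA w rest c := by
  simp [pvInnerA, hv, hne]

-- the counter after A's counting loop: per-word occurrence counts
lemma pv_counterA (xs : List String) : ∀ (a0 a1 a2 a3 a4 a5 a6 a7 a8 a9 : Int),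
    xs.foldl (fun c w => pvInnerA w (PySem.List.pyRange 0 10 1) c) [a0,a1,a2,a3,a4,a5,a6,a7,a8,a9]
      = [a0 + (xs.count "ZRO" : Int), a1 + (xs.count "ONE" : Int), a2 + (xs.count "TWO" : Int), a3 + (xs.count "THR" : Int), a4 + (xs.count "FOR" : Int), a5 + (xs.count "FIV" : Int), a6 + (xs.count "SIX" : Int), a7 + (xs.count "SVN" : Int), a8 + (xs.count "EGT" : Int), a9 + (xs.count "NIN" : Int)] := by
  induction xs with
  | nil => intro a0 a1 a2 a3 a4 a5 a6 a7 a8 a9; simp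
  | cons w t ih =>
    intro a0 a1 a2 a3 a4 a5 a6 a7 a8 a9
    simp only [List.foldl_cons]
    by_cases h0 : w = "ZRO"
    · subst h0
      rw [show pvInnerA "ZRO" (PySem.List.pyRange 0 10 1) [a0,a1,a2,a3,a4,a5,a6,a7,a8,a9] = [a0+1,a1,a2,a3,a4,a5,a6,a7,a8,a9] from rfl, ih]
      simp
      omega
    by_cases h1 : w = "ONE"
    · subst h1
      rw [show pvInnerA "ONE" (PySem.List.pyRange 0 10 1) [a0,a1,a2,a3,a4,a5,a6,a7,a8,a9] = [a0,a1+1,a2,a3,a4,a5,a6,a7,a8,a9] from rfl, ih]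
      simp
      omega
    by_cases h2 : w = "TWO"
    · subst h2
      rw [show pvInnerA "TWO" (PySem.List.pyRange 0 10 1) [a0,a1,a2,a3,a4,a5,a6,a7,a8,a9] = [a0,a1,a2+1,a3,a4,a5,a6,a7,a8,a9] from rfl, ih]
      simp
      omega
    by_cases h3 : w = "THR"
    · subst h3
      rw [show pvInnerA "THR" (PySem.List.pyRange 0 10 1) [a0,a1,a2,a3,a4,a5,a6,a7,a8,a9] = [a0,a1,a2,a3+1,a4,a5,a6,a7,a8,a9] from rfl, ih]
      simp
      omega
    by_cases h4 : w = "FOR"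
    · subst h4
      rw [show pvInnerA "FOR" (PySem.List.pyRange 0 10 1) [a0,a1,a2,a3,a4,a5,a6,a7,a8,a9] = [a0,a1,a2,a3,a4+1,a5,a6,a7,a8,a9] from rfl, ih]
      simp
      omega
    by_cases h5 : w = "FIV"
    · subst h5
      rw [show pvInnerA "FIV" (PySem.List.pyRange 0 10 1) [a0,a1,a2,a3,a4,a5,a6,a7,a8,a9] = [a0,a1,a2,a3,a4,a5+1,a6,a7,a8,a9] from rfl, ih]
      simp
      omega
    by_cases h6 : w = "SIX"
    · subst h6
      rw [show pvInnerA "SIX" (PySem.List.pyRange 0 10 1) [a0,a1,a2,a3,a4,a5,a6,a7,a8,a9] = [a0,a1,a2,a3,a4,a5,a6+1,a7,a8,a9] from rfl, ih]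
      simp
      omega
    by_cases h7 : w = "SVN"
    · subst h7
      rw [show pvInnerA "SVN" (PySem.List.pyRange 0 10 1) [a0,a1,a2,a3,a4,a5,a6,a7,a8,a9] = [a0,a1,a2,a3,a4,a5,a6,a7+1,a8,a9] from rfl, ih]
      simp
      omega
    by_cases h8 : w = "EGT"
    · subst h8
      rw [show pvInnerA "EGT" (PySem.List.pyRange 0 10 1) [a0,a1,a2,a3,a4,a5,a6,a7,a8,a9] = [a0,a1,a2,a3,a4,a5,a6,a7,a8+1,a9] from rfl, ih]
      simp
      omega
    by_cases h9 : w = "NIN"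
    · subst h9
      rw [show pvInnerA "NIN" (PySem.List.pyRange 0 10 1) [a0,a1,a2,a3,a4,a5,a6,a7,a8,a9] = [a0,a1,a2,a3,a4,a5,a6,a7,a8,a9+1] from rfl, ih]
      simp
      omega
    · have e : pvInnerA w (PySem.List.pyRange 0 10 1) [a0,a1,a2,a3,a4,a5,a6,a7,a8,a9] = [a0,a1,a2,a3,a4,a5,a6,a7,a8,a9] := by
        rw [show PySem.List.pyRange 0 10 1 = [0,1,2,3,4,5,6,7,8,9] from rfl]
        rw [pvInnerA_skip w "ZRO" 0 _ _ rfl h0, pvInnerA_skip w "ONE" 1 _ _ rfl h1, pvInnerA_skip w "TWO" 2 _ _ rfl h2, pvInnerA_skip w "THR" 3 _ _ rfl h3, pvInnerA_skip w "FOR" 4 _ _ rfl h4, pvInnerA_skip w "FIV" 5 _ _ rfl h5, pvInnerA_skip w "SIX" 6 _ _ rfl h6, pvInnerA_skip w "SVN" 7 _ _ rfl h7, pvInnerA_skip w "EGT" 8 _ _ rfl h8, pvInnerA_skip w "NIN" 9 _ _ rfl h9]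
        rfl
      rw [e, ih]
      simp [h0, h1, h2, h3, h4, h5, h6, h7, h8, h9]

lemma pvG0 (x0 x1 x2 x3 x4 x5 x6 x7 x8 x9 : Int) : PySem.List.pyGetD [x0,x1,x2,x3,x4,x5,x6,x7,x8,x9] (0 : Int) 0 = x0 := rfl
lemma pvG1 (x0 x1 x2 x3 x4 x5 x6 x7 x8 x9 : Int) : PySem.List.pyGetD [x0,x1,x2,x3,x4,x5,x6,x7,x8,x9] (1 : Int) 0 = x1 := rfl
lemma pvG2 (x0 x1 x2 x3 x4 x5 x6 x7 x8 x9 : Int) : PySem.List.pyGetD [x0,x1,x2,x3,x4,x5,x6,x7,x8,x9] (2 : Int) 0 = x2 := rfl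
lemma pvG3 (x0 x1 x2 x3 x4 x5 x6 x7 x8 x9 : Int) : PySem.List.pyGetD [x0,x1,x2,x3,x4,x5,x6,x7,x8,x9] (3 : Int) 0 = x3 := rfl
lemma pvG4 (x0 x1 x2 x3 x4 x5 x6 x7 x8 x9 : Int) : PySem.List.pyGetD [x0,x1,x2,x3,x4,x5,x6,x7,x8,x9] (4 : Int) 0 = x4 := rfl
lemma pvG5 (x0 x1 x2 x3 x4 x5 x6 x7 x8 x9 : Int) : PySem.List.pyGetD [x0,x1,x2,x3,x4,x5,x6,x7,x8,x9] (5 : Int) 0 = x5 := rfl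
lemma pvG6 (x0 x1 x2 x3 x4 x5 x6 x7 x8 x9 : Int) : PySem.List.pyGetD [x0,x1,x2,x3,x4,x5,x6,x7,x8,x9] (6 : Int) 0 = x6 := rfl
lemma pvG7 (x0 x1 x2 x3 x4 x5 x6 x7 x8 x9 : Int) : PySem.List.pyGetD [x0,x1,x2,x3,x4,x5,x6,x7,x8,x9] (7 : Int) 0 = x7 := rfl
lemma pvG8 (x0 x1 x2 x3 x4 x5 x6 x7 x8 x9 : Int) : PySem.List.pyGetD [x0,x1,x2,x3,x4,x5,x6,x7,x8,x9] (8 : Int) 0 = x8 := rfl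
lemma pvG9 (x0 x1 x2 x3 x4 x5 x6 x7 x8 x9 : Int) : PySem.List.pyGetD [x0,x1,x2,x3,x4,x5,x6,x7,x8,x9] (9 : Int) 0 = x9 := rfl
lemma pvN0 : PySem.List.pyGetD pvNumList (0 : Int) "" = "ZRO" := rfl
lemma pvN1 : PySem.List.pyGetD pvNumList (1 : Int) "" = "ONE" := rfl
lemma pvN2 : PySem.List.pyGetD pvNumList (2 : Int) "" = "TWO" := rfl
lemma pvN3 : PySem.List.pyGetD pvNumList (3 : Int) "" = "THR" := rfl
lemma pvN4 : PySem.List.pyGetD pvNumList (4 : Int) "" = "FOR" := rfl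
lemma pvN5 : PySem.List.pyGetD pvNumList (5 : Int) "" = "FIV" := rfl
lemma pvN6 : PySem.List.pyGetD pvNumList (6 : Int) "" = "SIX" := rfl
lemma pvN7 : PySem.List.pyGetD pvNumList (7 : Int) "" = "SVN" := rfl
lemma pvN8 : PySem.List.pyGetD pvNumList (8 : Int) "" = "EGT" := rfl
lemma pvN9 : PySem.List.pyGetD pvNumList (9 : Int) "" = "NIN" := rfl

-- 'for _ in range(c): out.append(s)' appends replicate
lemma pv_repLoopNat (s : String) : ∀ (n : Nat) (acc : List String),
    (List.range n).foldl (fun a _ => a ++ [s]) acc = acc ++ List.replicate n s := by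
  intro n
  induction n with
  | zero => intro acc; simp
  | succ n ih =>
    intro acc
    rw [List.range_succ, List.foldl_append, ih, List.replicate_succ']
    simp

lemma pv_repLoop (c : Int) (s : String) (acc : List String) :
    (PySem.List.pyRange 0 c 1).foldl (fun a _ => a ++ [s]) acc = acc ++ List.replicate c.toNat s := by
  rw [PySem.List.pyRange_one]
  simp only [List.foldl_map]
  rw [pv_repLoopNat]
  norm_num

-- A's output-building double loop on a 10-entry counter
lemma pv_buildA (x0 x1 x2 x3 x4 x5 x6 x7 x8 x9 : Int) :
    (PySem.List.pyRange 0 10 1).foldl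
        (fun acc i =>
          (PySem.List.pyRange 0 (PySem.List.pyGetD [x0,x1,x2,x3,x4,x5,x6,x7,x8,x9] i 0) 1).foldl
            (fun acc2 _ => acc2 ++ [PySem.List.pyGetD pvNumList i ""]) acc) []
      = List.replicate x0.toNat "ZRO" ++ List.replicate x1.toNat "ONE" ++ List.replicate x2.toNat "TWO" ++ List.replicate x3.toNat "THR" ++ List.replicate x4.toNat "FOR" ++ List.replicate x5.toNat "FIV" ++ List.replicate x6.toNat "SIX" ++ List.replicate x7.toNat "SVN" ++ List.replicate x8.toNat "EGT" ++ List.replicate x9.toNat "NIN" := by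
  rw [show PySem.List.pyRange 0 10 1 = [0,1,2,3,4,5,6,7,8,9] from rfl]
  simp only [List.foldl_cons, List.foldl_nil]
  simp only [pv_repLoop, pvG0, pvG1, pvG2, pvG3, pvG4, pvG5, pvG6, pvG7, pvG8, pvG9, pvN0, pvN1, pvN2, pvN3, pvN4, pvN5, pvN6, pvN7, pvN8, pvN9, List.nil_append]

-- stacking one key-group below a pairwise-ordered rest
lemma pv_pw (v : String) (n : Nat) (rest : List String)
    (hrest : rest.Pairwise (fun a b => pvKey a ≤ pvKey b))
    (hv : ∀ b ∈ rest, pvKey v ≤ pvKey b) :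
    (List.replicate n v ++ rest).Pairwise (fun a b => pvKey a ≤ pvKey b) := by
  rw [List.pairwise_append]
  exact ⟨List.pairwise_replicate.mpr (Or.inr le_rfl), hrest,
    fun a ha b hb => (List.eq_of_mem_replicate ha) ▸ hv b hb⟩

lemma pv_pw_flatMap (ys : List String) : ∀ (L : List String),
    L.Pairwise (fun u v => pvKey u ≤ pvKey v) →
    (L.flatMap (fun v => List.replicate (ys.count v) v)).Pairwise (fun a b => pvKey a ≤ pvKey b) := by
  intro L
  induction L with
  | nil => intro _; simp
  | cons v L ih =>
    intro hp
    rcases List.pairwise_cons.mp hp with ⟨hv, hL⟩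
    rw [List.flatMap_cons]
    refine pv_pw v _ _ (ih hL) ?_
    intro b hb
    simp only [List.mem_flatMap] at hb
    rcases hb with ⟨u, hu, hb⟩
    rw [List.eq_of_mem_replicate hb]
    exact hv u hu

lemma pv_mem_canon (ys : List String) (b : String) (hb : b ∈ pvCanon ys) : b ∈ pvNumList := by
  simp only [pvCanon, List.mem_flatMap] at hb
  rcases hb with ⟨v, hv, hb⟩
  rw [List.eq_of_mem_replicate hb]
  exact hv

lemma pv_canon_perm (ys : List String) (h : ∀ w ∈ ys, w ∈ pvNumList) : (pvCanon ys).Perm ys := by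
  rw [List.perm_iff_count]
  intro a
  by_cases h0 : a = "ZRO"
  · subst h0; simp [pvCanon, pvNumList, List.count_replicate]
  by_cases h1 : a = "ONE"
  · subst h1; simp [pvCanon, pvNumList, List.count_replicate]
  by_cases h2 : a = "TWO"
  · subst h2; simp [pvCanon, pvNumList, List.count_replicate]
  by_cases h3 : a = "THR"
  · subst h3; simp [pvCanon, pvNumList, List.count_replicate]
  by_cases h4 : a = "FOR"
  · subst h4; simp [pvCanon, pvNumList, List.count_replicate]
  by_cases h5 : a = "FIV"
  · subst h5; simp [pvCanon, pvNumList, List.count_replicate]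
  by_cases h6 : a = "SIX"
  · subst h6; simp [pvCanon, pvNumList, List.count_replicate]
  by_cases h7 : a = "SVN"
  · subst h7; simp [pvCanon, pvNumList, List.count_replicate]
  by_cases h8 : a = "EGT"
  · subst h8; simp [pvCanon, pvNumList, List.count_replicate]
  by_cases h9 : a = "NIN"
  · subst h9; simp [pvCanon, pvNumList, List.count_replicate]
  · have ha : a ∉ ys := by
      intro hm
      have hmem := h a hm
      simp [pvNumList] at hmem
      tauto
    simp [pvCanon, pvNumList, List.count_replicate, Ne.symm h0, Ne.symm h1, Ne.symm h2, Ne.symm h3, Ne.symm h4, Ne.symm h5, Ne.symm h6, Ne.symm h7, Ne.symm h8, Ne.symm h9, List.count_eq_zero.mpr ha]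

-- B's stable sort of a sublist of the ten words equals the canonical grouped list
lemma pv_sorted_canon (ys : List String) (h : ∀ w ∈ ys, w ∈ pvNumList) :
    PySem.List.sorted ys pvKey false = pvCanon ys := by
  have hinj : ∀ a ∈ pvNumList, ∀ b ∈ pvNumList, pvKey a = pvKey b → a = b := by decide
  have hperm : (PySem.List.sorted ys pvKey false).Perm (pvCanon ys) :=
    (PySem.List.sorted_perm ys pvKey false).trans (pv_canon_perm ys h).symm
  have hps := PySem.List.sorted_pairwise ys pvKey
  have hpc : (pvCanon ys).Pairwise (fun a b => pvKey a ≤ pvKey b) :=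
    pv_pw_flatMap ys pvNumList (by decide)
  refine List.Perm.eq_of_pairwise ?_ hps hpc hperm
  intro a b ha hb h1 h2
  have ha' : a ∈ pvNumList := h a ((PySem.List.mem_sorted _ _ _ _).mp ha)
  have hb' : b ∈ pvNumList := pv_mem_canon ys b hb
  exact hinj a ha' b hb' (le_antisymm h1 h2)

-- the filter does not change the counts the canonical list uses
lemma pv_canon_filter (xs : List String) :
    pvCanon (xs.filter (fun w => pvNumList.contains w)) = pvCanon xs := by
  simp [pvCanon, pvNumList, List.count_filter]

-- ===== VERDICT (by name: the statement is the Claim_ definition above) =====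
theorem Weird_numbers_sort_spec : Claim_equal_Weird_numbers_sort := by
  intro N W _ hpre
  unfold Spec_Weird_numbers_sort Weird_numbers_sort Weird_numbers_sort_alt
  simp only []
  rw [pv_loopA W N hpre, pv_loopB W N hpre,
      show (List.replicate 10 (0:Int)) = [0,0,0,0,0,0,0,0,0,0] from rfl, pv_counterA]
  simp only [zero_add]
  rw [pv_buildA, PySem.List.foldl_append_if_eq_filter, List.nil_append]
  rw [pv_sorted_canon _ (fun w hw => by simpa using (List.mem_filter.mp hw).2), pv_canon_filter]
  simp [pvCanon, pvNumList, List.append_assoc]
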